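-- pv_equiv track=rewrite | github.com/luolingchun/pyqss | pyqss/sci/commenter.py | merge_selections
-- ===== SOURCE A (Python) =====
-- def merge_selections(selections):
--     """
--     This function merges selections with overlapping lines
--     """
--     # Test if merging is required
--     if len(selections) < 2:
--         return selections
--     merged_selections = []
--     skip_flag = False
--     for i in range(1, len(selections)):
--         # Get the line numbers
--         previous_start_line = selections[i - 1][0]
--         previous_end_line = selections[i - 1][1]
--         current_start_line = selections[i][0]
--         current_end_line = selections[i][1]
--         # Test for merge
--         if previous_end_line == current_start_line and not skip_flag:
--             merged_selections.append(
--                 (previous_start_line, current_end_line)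
--             )
--             skip_flag = True
--         else:
--             if not skip_flag:
--                 merged_selections.append(
--                     (previous_start_line, previous_end_line)
--                 )
--             skip_flag = False
--             # Add the last selection only if it was not merged
--             if i == (len(selections) - 1):
--                 merged_selections.append(
--                     (current_start_line, current_end_line)
--                 )
--     # Return the merged selections
--     return merged_selections
-- ===== SOURCE B (Python) =====
-- def merge_selections(selections):
--     """
--     This function merges selections with overlapping lines
--     """
--     if len(selections) < 2:
--         return selections
--
--     def go(sel):
--         if len(sel) >= 2 and sel[0][1] == sel[1][0]:
--             return [(sel[0][0], sel[1][1])] + go(sel[2:])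
--         if sel:
--             return [(sel[0][0], sel[0][1])] + go(sel[1:])
--         return []
--
--     return go(selections)
-- ===== Notes on version B (the rewrite author's own statement) =====
-- stated objective: simpler
-- what changed: Replaced the index-based for-loop with skip_flag/last-element bookkeeping by a direct structural recursion that consumes one or two selections per step.
import Mathlib
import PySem

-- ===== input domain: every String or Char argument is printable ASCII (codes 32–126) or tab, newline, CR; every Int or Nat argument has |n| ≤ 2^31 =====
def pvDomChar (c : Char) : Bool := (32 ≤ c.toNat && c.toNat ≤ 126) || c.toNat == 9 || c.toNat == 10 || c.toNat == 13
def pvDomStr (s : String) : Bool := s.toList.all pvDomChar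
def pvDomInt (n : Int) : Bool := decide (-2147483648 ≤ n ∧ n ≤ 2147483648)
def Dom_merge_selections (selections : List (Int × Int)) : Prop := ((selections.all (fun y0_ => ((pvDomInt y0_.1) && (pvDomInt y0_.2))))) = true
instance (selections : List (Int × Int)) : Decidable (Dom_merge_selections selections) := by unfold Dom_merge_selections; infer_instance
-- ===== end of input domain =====

-- B replaces A's skip-flag state machine by a direct recursion that consumes one or
-- two selections per step (objective: simpler).

-- ===== PORT A =====
-- Loop body of A's for-loop, factored as a helper; indexing i-1 and i is always in
-- range here, so pyGetD with a dummy default is exact for Python's selections[i].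
def aStep (xs : List (Int × Int)) (st : List (Int × Int) × Bool) (i : Int) :
    List (Int × Int) × Bool :=
  let prev := PySem.List.pyGetD xs (i - 1) (0, 0)
  let cur := PySem.List.pyGetD xs i (0, 0)
  if prev.2 == cur.1 && !st.2 then
    (st.1 ++ [(prev.1, cur.2)], true)
  else
    (st.1 ++ (if !st.2 then [(prev.1, prev.2)] else []) ++
      (if i == (xs.length : Int) - 1 then [(cur.1, cur.2)] else []), false)

def merge_selections (selections : List (Int × Int)) : List (Int × Int) :=
  if selections.length < 2 then selections
  else
    ((PySem.List.pyRange 1 (selections.length : Int) 1).foldl (aStep selections)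
      ([], false)).1

-- ===== PORT B =====
def msGo : List (Int × Int) → List (Int × Int)
  | (a, b) :: (c, d) :: rest =>
      if b == c then (a, d) :: msGo rest else (a, b) :: msGo ((c, d) :: rest)
  | [x] => [x]
  | [] => []

def merge_selections_alt (selections : List (Int × Int)) : List (Int × Int) :=
  if selections.length < 2 then selections else msGo selections

-- ===== PRECONDITION & SPEC =====
def Spec_merge_selections (selections : List (Int × Int)) (out : List (Int × Int)) : Prop := out = merge_selections_alt selections
instance (selections : List (Int × Int)) (out : List (Int × Int)) : Decidable (Spec_merge_selections selections out) := by unfold Spec_merge_selections; infer_instance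

-- ===== CLAIM (what is proved, stated in full; the proofs are below) =====
def Claim_equal_merge_selections : Prop := ∀ (selections : List (Int × Int)), Dom_merge_selections selections → Spec_merge_selections selections (merge_selections selections)

-- ===== LEMMAS AND PROOFS =====

-- Invariant of A's loop, as a pair of statements for skip_flag = false / true,
-- over the suffix s of xs still to be consumed.
theorem loop_inv (s xs : List (Int × Int)) (j : ℕ) (acc : List (Int × Int))
    (hj : 1 ≤ j) (hs : s = xs.drop (j - 1)) :
    (2 ≤ s.length →
      ((PySem.List.pyRange (j : Int) (xs.length : Int) 1).foldl (aStep xs)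
        (acc, false)).1 = acc ++ msGo s)
  ∧ (1 ≤ s.length →
      ((PySem.List.pyRange (j : Int) (xs.length : Int) 1).foldl (aStep xs)
        (acc, true)).1 = acc ++ msGo s.tail) := by
  have hlen : s.length = xs.length - (j - 1) := by rw [hs, List.length_drop]
  match s, hs with
  | [], hs =>
    constructor
    · intro h2; simp at h2
    · intro h1; simp at h1
  | [x], hs =>
    constructor
    · intro h2; simp at h2
    · intro _
      have hjn : (j : Int) = (xs.length : Int) := by
        simp at hlen; omega
      rw [PySem.List.pyRange_one_eq_nil (le_of_eq hjn.symm)]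
      simp [msGo]
  | (a, b) :: (c, d) :: r, hs =>
    have hxlen : xs.length = j + 1 + r.length := by simp at hlen; omega
    have hdrop1 : xs.drop j = (c, d) :: r := by
      have : xs.drop (j - 1 + 1) = ((a, b) :: (c, d) :: r).tail := by
        rw [← List.tail_drop, hs]
      simpa [show j - 1 + 1 = j by omega] using this
    have hx : PySem.List.pyGetD xs ((j : Int) - 1) (0, 0) = (a, b) := by
      have h1 : ((j : Int) - 1) = ((j - 1 : ℕ) : Int) := by omega
      have h2 : xs[j - 1]? = some (a, b) := by
        rw [← List.head?_drop, ← hs]; rfl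
      rw [h1, PySem.List.pyGetD_natCast]
      simp [List.getD_eq_getElem?_getD, h2]
    have hy : PySem.List.pyGetD xs (j : Int) (0, 0) = (c, d) := by
      have h2 : xs[j]? = some (c, d) := by
        rw [← List.head?_drop, hdrop1]; rfl
      rw [PySem.List.pyGetD_natCast]
      simp [List.getD_eq_getElem?_getD, h2]
    have hjlt : (j : Int) < (xs.length : Int) := by omega
    rw [PySem.List.pyRange_one_cons hjlt]
    simp only [List.foldl_cons]
    constructor
    · intro _
      by_cases hbc : b = c
      · -- merge the pair, continue with skip_flag = true
        have hstep : aStep xs (acc, false) (j : Int) = (acc ++ [(a, d)], true) := by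
          simp [aStep, hx, hy, hbc]
        rw [hstep]
        have ih := (loop_inv ((c, d) :: r) xs (j + 1) (acc ++ [(a, d)])
          (by omega) (by simpa [show j + 1 - 1 = j from rfl] using hdrop1.symm)).2
          (by simp)
        push_cast at ih
        rw [ih]
        simp [msGo, hbc]
      · -- no merge: emit the previous selection
        have hne : (b == c) = false := by simp [hbc]
        match r, hdrop1, hxlen with
        | [], hdrop1, hxlen =>
          have hn : xs.length = j + 1 := by simpa using hxlen
          have hjint : ((j : Int) == (xs.length : Int) - 1) = true := by
            rw [beq_iff_eq]; omega
          have hstep : aStep xs (acc, false) (j : Int)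
              = (acc ++ [(a, b)] ++ [(c, d)], false) := by
            simp [aStep, hx, hy, hne, hjint]
          rw [hstep]
          rw [PySem.List.pyRange_one_eq_nil (by omega)]
          simp [msGo, hne]
        | z :: r', hdrop1, hxlen =>
          have hn : xs.length = j + 2 + r'.length := by simp at hxlen; omega
          have hjint : ((j : Int) == (xs.length : Int) - 1) = false := by
            rw [beq_eq_false_iff_ne]; omega
          have hstep : aStep xs (acc, false) (j : Int)
              = (acc ++ [(a, b)], false) := by
            simp [aStep, hx, hy, hne, hjint]
          rw [hstep]
          have ih := (loop_inv ((c, d) :: z :: r') xs (j + 1) (acc ++ [(a, b)])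
            (by omega) (by simpa using hdrop1.symm)).1 (by simp)
          push_cast at ih
          rw [ih]
          simp [msGo, hne]
    · intro _
      -- skip_flag is set: the current element was already merged away
      match r, hdrop1, hxlen with
      | [], hdrop1, hxlen =>
        have hn : xs.length = j + 1 := by simpa using hxlen
        have hjint : ((j : Int) == (xs.length : Int) - 1) = true := by
          rw [beq_iff_eq]; omega
        have hstep : aStep xs (acc, true) (j : Int) = (acc ++ [(c, d)], false) := by
          simp [aStep, hx, hy, hjint]
        rw [hstep]
        rw [PySem.List.pyRange_one_eq_nil (by omega)]
        simp [msGo]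
      | z :: r', hdrop1, hxlen =>
        have hn : xs.length = j + 2 + r'.length := by simp at hxlen; omega
        have hjint : ((j : Int) == (xs.length : Int) - 1) = false := by
          rw [beq_eq_false_iff_ne]; omega
        have hstep : aStep xs (acc, true) (j : Int) = (acc, false) := by
          simp [aStep, hx, hy, hjint]
        rw [hstep]
        have ih := (loop_inv ((c, d) :: z :: r') xs (j + 1) acc
          (by omega) (by simpa using hdrop1.symm)).1 (by simp)
        push_cast at ih
        rw [ih]
        simp [msGo]
termination_by s.length
decreasing_by all_goals simp

-- ===== VERDICT (by name: the statement is the Claim_ definition above) =====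
theorem merge_selections_spec : Claim_equal_merge_selections := by
  intro xs _
  unfold Spec_merge_selections merge_selections merge_selections_alt
  by_cases h : xs.length < 2
  · simp [h]
  · simp only [h, if_false]
    have := (loop_inv xs xs 1 [] (le_refl 1) (by simp)).1 (by omega)
    simpa using this
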